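-- pv_equiv track=rewrite | github.com/leonanfecosta/restaurant-orders | src/analyze_log.py | which_days_not_went
-- ===== SOURCE A (Python) =====
-- def which_days_not_went(name, orders):
--     orders_set = set()
--     client_set = set()
--
--     for order in orders:
--         if order['name'] == name:
--             client_set.add(order['day'])
--         orders_set.add(order['day'])
--     return orders_set.difference(client_set)
-- ===== SOURCE B (Python) =====
-- def which_days_not_went(name, orders):
--     days_to_names = {}
--     for order in orders:
--         days_to_names.setdefault(order['day'], set()).add(order['name'])
--     return {day for day, names in days_to_names.items() if name not in names}
-- ===== Notes on version B (the rewrite author's own statement) =====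
-- stated objective: alternative
-- what changed: Instead of accumulating two global day-sets and taking their difference, B groups orders into a dict mapping each day to the set of client names seen that day, then keeps the days whose name-set lacks the client.
import Mathlib
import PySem

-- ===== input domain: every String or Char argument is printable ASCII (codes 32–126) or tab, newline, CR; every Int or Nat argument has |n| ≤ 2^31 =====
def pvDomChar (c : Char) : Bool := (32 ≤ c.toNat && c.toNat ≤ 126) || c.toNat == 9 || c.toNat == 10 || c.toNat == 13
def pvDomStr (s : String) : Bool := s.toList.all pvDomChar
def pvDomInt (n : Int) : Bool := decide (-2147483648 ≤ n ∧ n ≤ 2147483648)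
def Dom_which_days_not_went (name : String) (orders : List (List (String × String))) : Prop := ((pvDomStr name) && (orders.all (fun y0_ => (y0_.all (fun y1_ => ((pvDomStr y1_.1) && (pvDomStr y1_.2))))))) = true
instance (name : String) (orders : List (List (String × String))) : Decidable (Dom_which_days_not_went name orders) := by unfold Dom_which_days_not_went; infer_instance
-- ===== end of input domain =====

-- B groups orders by day into a dict of name-sets and filters the days, instead of
-- A's two global day-sets and set difference (objective: alternative decomposition).
-- Return values are Python sets; under Pre_ both dict lookups succeed, and getD … ""
-- is exact for order['name'] / order['day'].

-- ===== PORT A =====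
def which_days_not_went (name : String) (orders : List (List (String × String))) : List String :=
  let p := orders.foldl
    (fun (s : PySem.Set String × PySem.Set String) o =>
      let d := PySem.Dict.mk o
      ( s.1.add (d.getD "day" ""),
        if d.getD "name" "" == name then s.2.add (d.getD "day" "") else s.2 ))
    (PySem.Set.empty, PySem.Set.empty)
  PySem.Set.diff p.1 p.2

-- ===== PORT B =====
def which_days_not_went_alt (name : String) (orders : List (List (String × String))) : List String :=
  let dn := orders.foldl
    (fun (d : PySem.Dict String (PySem.Set String)) o =>
      let od := PySem.Dict.mk o
      d.modify (od.getD "day" "") PySem.Set.empty (fun s => s.add (od.getD "name" "")))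
    PySem.Dict.empty
  (dn.items.filter (fun p => !(PySem.Set.contains p.2 name))).map Prod.fst

-- ===== PRECONDITION & SPEC =====
-- Pre_ excludes exactly the orders missing a 'name' or 'day' key, on which Python A raises KeyError.
def Pre_which_days_not_went (name : String) (orders : List (List (String × String))) : Prop :=
  ∀ o ∈ orders, (∃ p ∈ o, p.1 = "name") ∧ (∃ p ∈ o, p.1 = "day")
instance (name : String) (orders : List (List (String × String))) : Decidable (Pre_which_days_not_went name orders) := by unfold Pre_which_days_not_went; infer_instance

def pvWitness_which_days_not_went : String × (List (List (String × String))) :=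
  ("Ana", [[("name", "Ana"), ("day", "mon")], [("name", "Bob"), ("day", "tue")]])

def Spec_which_days_not_went (name : String) (orders : List (List (String × String))) (out : List String) : Prop := out = which_days_not_went_alt name orders
instance (name : String) (orders : List (List (String × String))) (out : List String) : Decidable (Spec_which_days_not_went name orders out) := by unfold Spec_which_days_not_went; infer_instance

-- ===== CLAIM (what is proved, stated in full; the proofs are below) =====
def Claim_equal_which_days_not_went : Prop := ∀ (name : String) (orders : List (List (String × String))), Dom_which_days_not_went name orders → Pre_which_days_not_went name orders → Spec_which_days_not_went name orders (which_days_not_went name orders)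

-- ===== LEMMAS AND PROOFS =====

-- accessors of an order row, as the ports compute them
def pvDay (o : List (String × String)) : String := (PySem.Dict.mk o).getD "day" ""
def pvName (o : List (String × String)) : String := (PySem.Dict.mk o).getD "name" ""

-- A's fold, componentwise
theorem foldA_fst (name : String) (l : List (List (String × String)))
    (s : PySem.Set String × PySem.Set String) :
    (l.foldl (fun (s : PySem.Set String × PySem.Set String) o =>
        ( s.1.add (pvDay o),
          if pvName o == name then s.2.add (pvDay o) else s.2 )) s).1
      = l.foldl (fun t o => t.add (pvDay o)) s.1 := by
  induction l generalizing s with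
  | nil => rfl
  | cons o l ih => simp only [List.foldl]; exact ih _

theorem foldA_snd (name : String) (l : List (List (String × String)))
    (s : PySem.Set String × PySem.Set String) :
    (l.foldl (fun (s : PySem.Set String × PySem.Set String) o =>
        ( s.1.add (pvDay o),
          if pvName o == name then s.2.add (pvDay o) else s.2 )) s).2
      = (l.filter (fun o => pvName o == name)).foldl (fun t o => t.add (pvDay o)) s.2 := by
  induction l generalizing s with
  | nil => rfl
  | cons o l ih =>
    by_cases h : (pvName o == name) = true
    · simp only [List.foldl, List.filter_cons, h, if_pos]
      rw [ih]
    · simp only [List.foldl, List.filter_cons, h, Bool.false_eq_true, if_false]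
      rw [ih]

-- B's grouping fold: value stored under day c
theorem foldB_getD (l : List (List (String × String)))
    (d : PySem.Dict String (PySem.Set String)) (c : String) :
    (l.foldl (fun d o => d.modify (pvDay o) PySem.Set.empty (fun s => s.add (pvName o))) d).getD c PySem.Set.empty
      = ((l.filter (fun o => pvDay o == c)).map pvName).foldl
          (fun (s : PySem.Set String) n => s.add n) (d.getD c PySem.Set.empty) := by
  induction l generalizing d with
  | nil => rfl
  | cons o l ih =>
    by_cases h : pvDay o = c
    · subst h
      simp only [List.foldl, List.filter_cons, beq_self_eq_true, if_pos, List.map_cons]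
      rw [ih, PySem.Dict.getD_modify_self]
    · have h' : ¬ (pvDay o == c) = true := by simp [h]
      simp only [List.foldl, List.filter_cons, h', Bool.false_eq_true, if_false]
      rw [ih, PySem.Dict.getD_modify_of_ne _ _ _ (Ne.symm h)]

-- items-filter of a nodup-key assoc list = keys-filter through getD
theorem items_filter_map_fst (q : PySem.Set String → Bool)
    (ps : List (String × PySem.Set String)) (h : (ps.map Prod.fst).Nodup) :
    (ps.filter (fun p => q p.2)).map Prod.fst
      = (ps.map Prod.fst).filter
          (fun k => q ((PySem.Dict.mk ps).getD k PySem.Set.empty)) := by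
  induction ps with
  | nil => rfl
  | cons p ps ih =>
    obtain ⟨k0, v0⟩ := p
    simp only [List.map_cons, List.nodup_cons] at h
    have hget : ∀ k ∈ ps.map Prod.fst,
        (PySem.Dict.mk ((k0, v0) :: ps)).getD k PySem.Set.empty
          = (PySem.Dict.mk ps).getD k PySem.Set.empty := by
      intro k hk
      have hne : ¬ (k0 == k) = true := by
        simp only [beq_iff_eq]
        intro he; exact h.1 (he ▸ hk)
      simp [PySem.Dict.getD, PySem.Dict.get?_mk_cons, hne]
    have hself : (PySem.Dict.mk ((k0, v0) :: ps)).getD k0 PySem.Set.empty = v0 := by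
      simp [PySem.Dict.getD, PySem.Dict.get?_mk_cons]
    have htail : (ps.map Prod.fst).filter
          (fun k => q ((PySem.Dict.mk ((k0, v0) :: ps)).getD k PySem.Set.empty))
        = (ps.map Prod.fst).filter
          (fun k => q ((PySem.Dict.mk ps).getD k PySem.Set.empty)) :=
      List.filter_congr (fun k hk => by rw [hget k hk])
    by_cases hq : q v0 = true
    · rw [List.filter_cons, if_pos hq, List.map_cons, ih h.2, List.map_cons,
        List.filter_cons, hself, if_pos hq, htail]
    · rw [List.filter_cons, if_neg hq, ih h.2, List.map_cons,
        List.filter_cons, hself, if_neg hq, htail]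

-- membership in a pure add-fold
theorem mem_add_fold (xs : List String) (s : PySem.Set String) (y : String) :
    y ∈ xs.foldl (fun (s : PySem.Set String) n => s.add n) s ↔ y ∈ s ∨ y ∈ xs := by
  have := PySem.Set.mem_foldl_add (l := xs) (f := fun n => n) (s := s) (y := y)
  simpa using this

-- ===== VERDICT (by name: the statement is the Claim_ definition above) =====
theorem which_days_not_went_spec : Claim_equal_which_days_not_went := by
  intro name orders _ _
  show which_days_not_went name orders = which_days_not_went_alt name orders
  unfold which_days_not_went which_days_not_went_alt
  simp only []
  -- A side
  rw [show (fun (s : PySem.Set String × PySem.Set String) (o : List (String × String)) =>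
        ( s.1.add ((PySem.Dict.mk o).getD "day" ""),
          if (PySem.Dict.mk o).getD "name" "" == name then s.2.add ((PySem.Dict.mk o).getD "day" "") else s.2 ))
      = (fun (s : PySem.Set String × PySem.Set String) o =>
        ( s.1.add (pvDay o),
          if pvName o == name then s.2.add (pvDay o) else s.2 )) from rfl]
  rw [show (fun (d : PySem.Dict String (PySem.Set String)) (o : List (String × String)) =>
        d.modify ((PySem.Dict.mk o).getD "day" "") PySem.Set.empty
          (fun s => s.add ((PySem.Dict.mk o).getD "name" "")))
      = (fun (d : PySem.Dict String (PySem.Set String)) o =>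
        d.modify (pvDay o) PySem.Set.empty (fun s => s.add (pvName o))) from rfl]
  -- name the grouped dict
  set D := orders.foldl
      (fun (d : PySem.Dict String (PySem.Set String)) o =>
        d.modify (pvDay o) PySem.Set.empty (fun s => s.add (pvName o))) PySem.Dict.empty with hD
  have hkeysD : D.keys = PySem.Set.ofList (orders.map pvDay) := by
    rw [hD, PySem.Dict.keys_foldl_modify_key orders pvDay PySem.Set.empty
      (fun _ o => (fun s => s.add (pvName o)))]
    simp [PySem.Dict.keys_empty, PySem.Set.update_empty, PySem.Set.update_nil_left]
  have hnodupD : D.keys.Nodup := by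
    rw [hkeysD]; exact PySem.Set.nodup_ofList _
  -- rewrite B through items_filter_map_fst
  have hB : (D.items.filter (fun p => !(PySem.Set.contains p.2 name))).map Prod.fst
      = D.keys.filter (fun k => !(PySem.Set.contains (D.getD k PySem.Set.empty) name)) := by
    have := items_filter_map_fst (fun s => !(PySem.Set.contains s name)) D.items
      (by simpa [PySem.Dict.keys] using hnodupD)
    simpa [PySem.Dict.keys] using this
  rw [hB, hkeysD]
  -- rewrite A componentwise
  rw [foldA_fst, foldA_snd,
    ← PySem.Set.update_map_eq_foldl_add orders pvDay PySem.Set.empty,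
    ← PySem.Set.update_map_eq_foldl_add (orders.filter (fun o => pvName o == name)) pvDay PySem.Set.empty,
    PySem.Set.update_empty, PySem.Set.update_empty]
  unfold PySem.Set.diff
  apply List.filter_congr
  intro k _
  have h1 : PySem.Set.contains (PySem.Set.ofList ((orders.filter (fun o => pvName o == name)).map pvDay)) k = true
      ↔ ∃ o ∈ orders, pvName o = name ∧ pvDay o = k := by
    rw [PySem.Set.contains_iff, PySem.Set.mem_ofList]
    simp only [List.mem_map, List.mem_filter, beq_iff_eq]
    constructor
    · rintro ⟨o, ⟨ho, hn⟩, hk⟩; exact ⟨o, ho, hn, hk⟩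
    · rintro ⟨o, ho, hn, hk⟩; exact ⟨o, ⟨ho, hn⟩, hk⟩
  have h2 : PySem.Set.contains (D.getD k PySem.Set.empty) name = true
      ↔ ∃ o ∈ orders, pvName o = name ∧ pvDay o = k := by
    rw [hD, foldB_getD, PySem.Dict.getD_empty, PySem.Set.contains_iff, mem_add_fold]
    simp only [PySem.Set.empty, List.not_mem_nil, false_or, List.mem_map, List.mem_filter,
      beq_iff_eq]
    constructor
    · rintro ⟨o, ⟨ho, hd⟩, hn⟩; exact ⟨o, ho, hn, hd⟩
    · rintro ⟨o, ho, hn, hd⟩; exact ⟨o, ⟨ho, hd⟩, hn⟩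
  congr 1
  rw [Bool.eq_iff_iff, h1, h2]
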